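-- pv_equiv track=rewrite | github.com/charles-uno/project-euler | po-205.py | increment_partitions
-- ===== SOURCE A (Python) =====
-- def increment_partitions(parts, ndice, nsides):
--     new_parts = set()
--     # Each time we increment, find all the arrangements that roll 1
--     # more pip. So (1, 1, 2) turns into (2, 1, 2), (1, 2, 2), and
--     # (1, 1, 3).
--     for part in parts:
--         for i in range(ndice):
--             tmp = list(part)
--             tmp[i] += 1
--             # Throw away anything that has a d6 rolling 7.
--             if tmp[i] <= nsides:
--                 # Store as a set of sorted tuples to collapse (1, 2, 2)
--                 # and (2, 1, 2).
--                 new_parts.add( tuple( sorted(tmp) ) )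
--     return new_parts
-- ===== SOURCE B (Python) =====
-- def increment_partitions(parts, ndice, nsides):
--     # For each partition, look at its distinct die values among the ndice dice;
--     # every successor partition replaces one occurrence of some value v by v + 1
--     # (dropped when that would exceed nsides).
--     new_parts = set()
--     for part in parts:
--         for v in dict.fromkeys(part[:ndice]):
--             if v + 1 <= nsides:
--                 succ = list(part)
--                 succ.remove(v)
--                 succ.append(v + 1)
--                 new_parts.add(tuple(sorted(succ)))
--     return new_parts
-- ===== Notes on version B (the rewrite author's own statement) =====
-- stated objective: alternative
-- what changed: B iterates over each partition's distinct die values and forms each successor multiset by removing one occurrence of v and appending v+1, instead of A's per-index loop that copies the list, increments position i and relies on the set to collapse duplicate candidates; Pre_ excludes partitions with fewer than ndice entries (A raises IndexError) and negative dice counts where some partition has more than |ndice| entries (a nonsensical input where A's empty result and B's negative-slice result are both artefacts).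
-- outside the precondition, e.g. on increment_partitions({(1, 2)}, -1, 6): A returns set(), B returns {(2, 2)}; on increment_partitions({(1,)}, 2, 6): A raises IndexError, B returns {(2,)}
import Mathlib
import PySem

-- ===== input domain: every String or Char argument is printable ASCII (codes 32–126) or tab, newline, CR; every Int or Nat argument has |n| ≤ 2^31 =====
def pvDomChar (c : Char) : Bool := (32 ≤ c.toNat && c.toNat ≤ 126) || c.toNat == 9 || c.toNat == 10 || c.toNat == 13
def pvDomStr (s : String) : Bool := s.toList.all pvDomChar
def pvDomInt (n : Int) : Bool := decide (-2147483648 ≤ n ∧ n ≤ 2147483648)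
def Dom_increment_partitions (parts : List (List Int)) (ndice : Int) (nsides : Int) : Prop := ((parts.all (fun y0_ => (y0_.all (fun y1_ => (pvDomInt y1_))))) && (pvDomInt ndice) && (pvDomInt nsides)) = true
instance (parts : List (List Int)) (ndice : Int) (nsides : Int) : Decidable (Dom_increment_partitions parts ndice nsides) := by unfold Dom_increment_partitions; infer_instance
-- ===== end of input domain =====

-- B iterates each partition's DISTINCT die values (a multiset/value view, via dict.fromkeys)
-- instead of every index position, building each successor by remove/append; objective: alternative.


-- ===== PORT A =====
def increment_partitions (parts : List (List Int)) (ndice : Int) (nsides : Int) : List (List Int) :=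
  parts.foldl (fun new_parts part =>
    (PySem.List.pyRange 0 ndice).foldl (fun new_parts i =>
      -- tmp = list(part); tmp[i] += 1   (IndexError = none, excluded by Pre_)
      match PySem.List.pyGet? part i with
      | none => new_parts
      | some v =>
        let tmp := PySem.List.pySetD part i (v + 1)
        -- after the assignment tmp[i] is v + 1
        if v + 1 ≤ nsides then
          PySem.Set.add new_parts (PySem.List.sorted tmp (fun x => x))
        else new_parts) new_parts) []

-- ===== PORT B =====
def increment_partitions_alt (parts : List (List Int)) (ndice : Int) (nsides : Int) : List (List Int) :=
  parts.foldl (fun new_parts part =>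
    -- for v in dict.fromkeys(part[:ndice]):
    (PySem.List.dedup (PySem.List.slice part none (some ndice))).foldl (fun new_parts v =>
      if v + 1 ≤ nsides then
        -- succ = list(part); succ.remove(v); succ.append(v + 1)   (v ∈ part, so remove never raises)
        let succ := ((PySem.List.remove? part v).getD part) ++ [v + 1]
        PySem.Set.add new_parts (PySem.List.sorted succ (fun x => x))
      else new_parts) new_parts) []

-- ===== PRECONDITION & SPEC =====
-- Pre_ excludes inputs on which A raises IndexError (a partition with fewer than ndice entries)
-- and negative dice counts on which some partition has more than |ndice| entries — a nonsensical
-- input where A's empty result (empty range) and B's negative-slice result are both artefacts.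
def Pre_increment_partitions (parts : List (List Int)) (ndice : Int) (nsides : Int) : Prop :=
  if 0 ≤ ndice then ∀ part ∈ parts, ndice ≤ (part.length : Int)
  else ∀ part ∈ parts, (part.length : Int) ≤ -ndice
instance (parts : List (List Int)) (ndice : Int) (nsides : Int) : Decidable (Pre_increment_partitions parts ndice nsides) := by unfold Pre_increment_partitions; infer_instance

def pvWitness_increment_partitions : List (List Int) × Int × Int := ([[1, 1, 2], [1, 2, 2]], 3, 6)

def Spec_increment_partitions (parts : List (List Int)) (ndice : Int) (nsides : Int) (out : List (List Int)) : Prop := out = increment_partitions_alt parts ndice nsides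
instance (parts : List (List Int)) (ndice : Int) (nsides : Int) (out : List (List Int)) : Decidable (Spec_increment_partitions parts ndice nsides out) := by unfold Spec_increment_partitions; infer_instance

-- ===== CLAIM (what is proved, stated in full; the proofs are below) =====
def Claim_equal_increment_partitions : Prop := ∀ (parts : List (List Int)) (ndice : Int) (nsides : Int), Dom_increment_partitions parts ndice nsides → Pre_increment_partitions parts ndice nsides → Spec_increment_partitions parts ndice nsides (increment_partitions parts ndice nsides)

-- ===== LEMMAS AND PROOFS =====

-- pySetD on an in-range nonnegative index is List.set
lemma pySetD_eq_set (xs : List Int) (i : Int) (v : Int) (h0 : 0 ≤ i) (h1 : i < (xs.length : Int)) :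
    PySem.List.pySetD xs i v = xs.set i.toNat v := by
  simp [PySem.List.pySetD, PySem.List.pySet?, PySem.List.pyIdx?, h0, h1]

-- replacing the element at index n by b is, as a multiset, removing one occurrence of its value
-- and appending b
lemma set_perm_erase_append (part : List Int) (n : Nat) (b : Int) (hn : n < part.length) :
    (part.set n b).Perm (part.erase part[n] ++ [b]) := by
  have hmem : part[n] ∈ part := List.getElem_mem hn
  have hsplit : part.drop n = part[n] :: part.drop (n + 1) := List.drop_eq_getElem_cons hn
  have hpart : part = part.take n ++ part[n] :: part.drop (n + 1) := by
    conv_lhs => rw [← List.take_append_drop n part, hsplit]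
  have hset : part.set n b = part.take n ++ b :: part.drop (n + 1) := by
    rw [List.set_eq_take_append_cons_drop, if_pos hn]
  have h1 : (part.set n b).Perm (b :: (part.take n ++ part.drop (n + 1))) := by
    rw [hset]; exact List.perm_middle
  have h2 : part.Perm (part[n] :: (part.take n ++ part.drop (n + 1))) := by
    conv_lhs => rw [hpart]
    exact List.perm_middle
  have h3 : part.Perm (part[n] :: part.erase part[n]) := List.perm_cons_erase hmem
  have h4 : (part.erase part[n]).Perm (part.take n ++ part.drop (n + 1)) :=
    (h3.symm.trans h2).cons_inv
  exact h1.trans ((h4.symm.cons b).trans (List.perm_append_singleton b _).symm)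

-- a Set.add fold only ever appends: the seed stays a prefix
lemma foldl_add_prefix : ∀ (l : List Int) (s : List Int), s <+: l.foldl PySem.Set.add s := by
  intro l
  induction l with
  | nil => intro s; exact List.prefix_rfl
  | cons x t ih =>
    intro s
    refine List.IsPrefix.trans ?_ (ih (PySem.Set.add s x))
    rw [PySem.Set.add_eq_ite]
    split_ifs
    · exact List.prefix_rfl
    · exact ⟨[x], rfl⟩

-- folding the guarded set-insertions over a stream equals folding them over the stream's new
-- (not-yet-seen) values only: a value seen before inserts nothing new
lemma foldl_step_drop (nsides : Int) (g : Int → List Int) :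
    ∀ (l s0 : List Int) (acc : List (List Int)),
    (∀ v ∈ s0, v + 1 ≤ nsides → g v ∈ acc) →
    l.foldl (fun a v => if v + 1 ≤ nsides then PySem.Set.add a (g v) else a) acc
      = ((l.foldl PySem.Set.add s0).drop s0.length).foldl
          (fun a v => if v + 1 ≤ nsides then PySem.Set.add a (g v) else a) acc := by
  intro l
  induction l with
  | nil => intro s0 acc _; simp
  | cons x t ih =>
    intro s0 acc h
    by_cases hx : x ∈ s0
    · have hstep : (if x + 1 ≤ nsides then PySem.Set.add acc (g x) else acc) = acc := by
        split_ifs with hp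
        · exact PySem.Set.add_of_mem (h x hx hp)
        · rfl
      simp only [List.foldl_cons, hstep, PySem.Set.add_of_mem hx]
      exact ih s0 acc h
    · have hadd : PySem.Set.add s0 x = s0 ++ [x] := PySem.Set.add_of_not_mem hx
      obtain ⟨r, hr⟩ := foldl_add_prefix t (s0 ++ [x])
      have hdrop : ((x :: t).foldl PySem.Set.add s0).drop s0.length = x :: r := by
        simp only [List.foldl_cons, hadd, ← hr, List.append_assoc, List.singleton_append]
        exact List.drop_left
      have hdrop' : (t.foldl PySem.Set.add (s0 ++ [x])).drop (s0 ++ [x]).length = r := by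
        rw [← hr, List.drop_left]
      have h' : ∀ v ∈ s0 ++ [x], v + 1 ≤ nsides →
          g v ∈ (if x + 1 ≤ nsides then PySem.Set.add acc (g x) else acc) := by
        intro v hv hp
        rcases List.mem_append.mp hv with hv | hv
        · have := h v hv hp
          split_ifs
          · exact (PySem.Set.mem_add _ _ _).mpr (Or.inl this)
          · exact this
        · rcases List.mem_singleton.mp hv with rfl
          rw [if_pos hp]
          exact (PySem.Set.mem_add _ _ _).mpr (Or.inr rfl)
      calc ((x :: t).foldl (fun a v => if v + 1 ≤ nsides then PySem.Set.add a (g v) else a) acc)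
          = t.foldl (fun a v => if v + 1 ≤ nsides then PySem.Set.add a (g v) else a)
              (if x + 1 ≤ nsides then PySem.Set.add acc (g x) else acc) := rfl
        _ = r.foldl (fun a v => if v + 1 ≤ nsides then PySem.Set.add a (g v) else a)
              (if x + 1 ≤ nsides then PySem.Set.add acc (g x) else acc) := by
              rw [ih (s0 ++ [x]) _ h', hdrop']
        _ = (((x :: t).foldl PySem.Set.add s0).drop s0.length).foldl
              (fun a v => if v + 1 ≤ nsides then PySem.Set.add a (g v) else a) acc := by
              rw [hdrop, List.foldl_cons]

-- corollary: the fold over a list equals the fold over its first-occurrence dedup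
lemma foldl_step_ofList (nsides : Int) (g : Int → List Int) (l : List Int)
    (acc : List (List Int)) :
    l.foldl (fun a v => if v + 1 ≤ nsides then PySem.Set.add a (g v) else a) acc
      = (PySem.Set.ofList l).foldl
          (fun a v => if v + 1 ≤ nsides then PySem.Set.add a (g v) else a) acc := by
  have := foldl_step_drop nsides g l [] acc (by simp)
  simpa [PySem.Set.ofList_eq_foldl] using this

-- per-partition: A's index loop equals B's distinct-value loop
lemma inner_eq (ndice nsides : Int) (part : List Int) (h0 : 0 ≤ ndice)
    (hlen : ndice ≤ (part.length : Int)) (np : List (List Int)) :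
    (PySem.List.pyRange 0 ndice).foldl (fun new_parts i =>
      match PySem.List.pyGet? part i with
      | none => new_parts
      | some v =>
        let tmp := PySem.List.pySetD part i (v + 1)
        if v + 1 ≤ nsides then
          PySem.Set.add new_parts (PySem.List.sorted tmp (fun x => x))
        else new_parts) np
    = (PySem.List.dedup (PySem.List.slice part none (some ndice))).foldl (fun new_parts v =>
        if v + 1 ≤ nsides then
          let succ := ((PySem.List.remove? part v).getD part) ++ [v + 1]
          PySem.Set.add new_parts (PySem.List.sorted succ (fun x => x))
        else new_parts) np := by
  have hplen : (part.take ndice.toNat).length = ndice.toNat := by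
    rw [List.length_take]
    omega
  have hnd : ((part.take ndice.toNat).length : Int) = ndice := by
    rw [hplen]; omega
  have hstep : (PySem.List.pyRange 0 ndice).foldl (fun new_parts i =>
      match PySem.List.pyGet? part i with
      | none => new_parts
      | some v =>
        let tmp := PySem.List.pySetD part i (v + 1)
        if v + 1 ≤ nsides then
          PySem.Set.add new_parts (PySem.List.sorted tmp (fun x => x))
        else new_parts) np
      = (PySem.List.pyRange 0 ((part.take ndice.toNat).length : Int)).foldl
          (fun a i => (fun a v => if v + 1 ≤ nsides then
              PySem.Set.add a (PySem.List.sorted (part.erase v ++ [v + 1]) (fun x => x))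
            else a) a (PySem.List.pyGetD (part.take ndice.toNat) i 0)) np := by
    rw [hnd]
    apply PySem.List.foldl_congr_mem
    intro a i hi
    obtain ⟨h1, h2⟩ := PySem.List.mem_pyRange_one.mp hi
    have h2' : i < ((part.take ndice.toNat).length : Int) := by rw [hnd]; exact h2
    have hip : i < (part.length : Int) := by
      rw [hnd] at h2'; omega
    have hin : i.toNat < part.length := by omega
    rw [PySem.List.pyGet?_eq_some_getElem part h1 hip]
    simp only
    rw [pySetD_eq_set part i _ h1 hip,
        PySem.List.sorted_eq_sorted_of_perm _ _ _ (fun a b hab => hab)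
          (set_perm_erase_append part i.toNat (part[i.toNat] + 1) hin),
        PySem.List.pyGetD_eq_getElem _ 0 h1 h2', List.getElem_take]
  rw [hstep,
      PySem.List.foldl_pyRange_zero_pyGetD' (part.take ndice.toNat) 0
        (fun a v => if v + 1 ≤ nsides then
          PySem.Set.add a (PySem.List.sorted (part.erase v ++ [v + 1]) (fun x => x)) else a) np,
      foldl_step_ofList nsides _ (part.take ndice.toNat) np,
      PySem.List.slice_to part h0, PySem.List.dedup_eq_ofList]
  apply PySem.List.foldl_congr_mem
  intro a v hv
  have hvp : v ∈ part :=
    List.mem_of_mem_take ((PySem.Set.mem_ofList _ _).mp hv)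
  simp only [PySem.List.remove?_eq_some_erase part v hvp, Option.getD_some]

-- with a negative die count both loops are empty: A's range(ndice) and B's part[:ndice]
-- once the partition has no more than |ndice| entries
lemma inner_eq_neg (ndice nsides : Int) (part : List Int) (h0 : ndice < 0)
    (hlen : (part.length : Int) ≤ -ndice) (np : List (List Int)) :
    (PySem.List.pyRange 0 ndice).foldl (fun new_parts i =>
      match PySem.List.pyGet? part i with
      | none => new_parts
      | some v =>
        let tmp := PySem.List.pySetD part i (v + 1)
        if v + 1 ≤ nsides then
          PySem.Set.add new_parts (PySem.List.sorted tmp (fun x => x))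
        else new_parts) np
    = (PySem.List.dedup (PySem.List.slice part none (some ndice))).foldl (fun new_parts v =>
        if v + 1 ≤ nsides then
          let succ := ((PySem.List.remove? part v).getD part) ++ [v + 1]
          PySem.Set.add new_parts (PySem.List.sorted succ (fun x => x))
        else new_parts) np := by
  have hr : PySem.List.pyRange 0 ndice = [] := by
    refine List.eq_nil_iff_forall_not_mem.mpr (fun x hx => ?_)
    have := PySem.List.mem_pyRange_one.mp hx
    omega
  have hk : ndice = -(((-ndice).toNat : Nat) : Int) := by omega
  have hs : PySem.List.slice part none (some ndice) = [] := by
    rw [hk, PySem.List.slice_to_neg_natCast part _ (by omega)]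
    have : part.length - (-ndice).toNat = 0 := by omega
    rw [this, List.take_zero]
  simp [hr, hs, PySem.List.dedup_eq_ofList]

-- ===== VERDICT (by name: the statement is the Claim_ definition above) =====
theorem increment_partitions_spec : Claim_equal_increment_partitions := by
  intro parts ndice nsides _ hpre
  unfold Spec_increment_partitions increment_partitions increment_partitions_alt
  refine PySem.List.foldl_congr_mem parts _ _ [] (fun np part hmem => ?_)
  unfold Pre_increment_partitions at hpre
  by_cases h0 : 0 ≤ ndice
  · rw [if_pos h0] at hpre
    exact inner_eq ndice nsides part h0 (hpre part hmem) np
  · rw [if_neg h0] at hpre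
    exact inner_eq_neg ndice nsides part (by omega) (hpre part hmem) np
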